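-- pv_equiv track=rewrite | github.com/JMespoir/2022_02_Python | Chapter_3/FromAtoB.py | solve
-- ===== SOURCE A (Python) =====
-- def solve(A,B,cnt):
--     if(B<A):
--         return -1
--     if(A==B):
--         return cnt+1
--     else:
--         if(B%10 == 1):
--             return solve(A,B//10,cnt+1)
--         elif(B%2 != 1):
--             return solve(A,B//2,cnt+1)
--         else:
--             return -1
-- ===== SOURCE B (Python) =====
-- def solve(A, B, cnt):
--     b = B
--     steps = 0
--     while b > A:
--         if b % 10 == 1:
--             b //= 10
--         elif b % 2 == 0:
--             b //= 2
--         else: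
--             return -1
--         steps += 1
--     return cnt + steps + 1 if b == A else -1
-- ===== Notes on version B (the rewrite author's own statement) =====
-- stated objective: idiomatic
-- what changed: Replaces A's recursion with an iterative while-loop over local state (b, steps) that exits on b <= A and computes the answer as cnt + steps + 1 at the end, avoiding Python's recursion-depth limit.
-- outside the precondition, e.g. on solve(-5, 6, 0): A returns -1, B returns -1; on solve(-5, 0, 0): A raises RecursionError, B does not finish within the time limit
import Mathlib
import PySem

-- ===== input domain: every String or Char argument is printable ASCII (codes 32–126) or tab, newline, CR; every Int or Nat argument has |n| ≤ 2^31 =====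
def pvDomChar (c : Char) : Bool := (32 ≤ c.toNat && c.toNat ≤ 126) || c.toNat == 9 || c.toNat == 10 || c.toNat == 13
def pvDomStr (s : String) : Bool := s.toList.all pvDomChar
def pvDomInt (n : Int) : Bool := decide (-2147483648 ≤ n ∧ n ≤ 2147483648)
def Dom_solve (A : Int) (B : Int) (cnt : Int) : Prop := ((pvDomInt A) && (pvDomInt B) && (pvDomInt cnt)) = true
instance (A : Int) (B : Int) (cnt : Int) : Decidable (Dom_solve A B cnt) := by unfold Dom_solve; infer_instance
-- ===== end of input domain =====

-- B replaces A's recursion by a while-loop over (b, steps) with exit test b > A and a final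
-- cnt + steps + 1 computation (objective: idiomatic iterative form, no recursion-depth limit).

-- ===== PORT A =====
-- fuel only makes the (genuinely diverging) recursion total in Lean; inside Dom ∧ Pre the
-- chain shortens every step, so 200 is never exhausted there.
def solveFuel : Nat → Int → Int → Int → Int
  | 0, _, _, _ => -1
  | fuel + 1, A, B, cnt =>
    if B < A then -1
    else if A = B then cnt + 1
    else if PySem.Int.mod B 10 = 1 then solveFuel fuel A (PySem.Int.floordiv B 10) (cnt + 1)
    else if PySem.Int.mod B 2 ≠ 1 then solveFuel fuel A (PySem.Int.floordiv B 2) (cnt + 1)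
    else -1

def solve (A : Int) (B : Int) (cnt : Int) : Int := solveFuel 200 A B cnt

-- ===== PORT B =====
-- the while-loop of Source B: state (b, steps); fuel only for Lean totality, as above.
def solveAltLoop (A : Int) (cnt : Int) : Nat → Int → Int → Int
  | 0, _, _ => -1
  | fuel + 1, b, steps =>
    if A < b then
      if PySem.Int.mod b 10 = 1 then solveAltLoop A cnt fuel (PySem.Int.floordiv b 10) (steps + 1)
      else if PySem.Int.mod b 2 = 0 then solveAltLoop A cnt fuel (PySem.Int.floordiv b 2) (steps + 1)
      else -1
    else if b = A then cnt + steps + 1 else -1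

def solve_alt (A : Int) (B : Int) (cnt : Int) : Int := solveAltLoop A cnt 200 B 0

-- ===== PRECONDITION & SPEC =====
-- Pre_ excludes inputs with A < 0 and 0 ≤ B not immediately stuck: there the reduction chain can
-- reach B = 0 and A then recurses forever (RecursionError); whether it does depends on the whole
-- chain, not on any closed-form test, so that region is excluded (on part of it both return -1 alike).
def Pre_solve (A : Int) (B : Int) (cnt : Int) : Prop :=
  0 ≤ A ∨ B < 0 ∨ (PySem.Int.mod B 2 = 1 ∧ PySem.Int.mod B 10 ≠ 1)
instance (A : Int) (B : Int) (cnt : Int) : Decidable (Pre_solve A B cnt) := by unfold Pre_solve; infer_instance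
def pvWitness_solve : Int × Int × Int := (3, 96, 0)

def Spec_solve (A : Int) (B : Int) (cnt : Int) (out : Int) : Prop := out = solve_alt A B cnt
instance (A : Int) (B : Int) (cnt : Int) (out : Int) : Decidable (Spec_solve A B cnt out) := by unfold Spec_solve; infer_instance

-- ===== CLAIM (what is proved, stated in full; the proofs are below) =====
def Claim_equal_solve : Prop := ∀ (A : Int) (B : Int) (cnt : Int), Dom_solve A B cnt → Pre_solve A B cnt → Spec_solve A B cnt (solve A B cnt)

-- ===== LEMMAS AND PROOFS =====

-- the recursion and the loop run in lock-step: with cnt split as cnt0 + steps they agree.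
theorem solveFuel_eq_loop (fuel : Nat) :
    ∀ (A B cnt0 steps : Int),
      solveFuel fuel A B (cnt0 + steps) = solveAltLoop A cnt0 fuel B steps := by
  induction fuel with
  | zero => intro A B cnt0 steps; rfl
  | succ f ih =>
    intro A B cnt0 steps
    simp only [solveFuel, solveAltLoop]
    by_cases hlt : B < A
    · have hA : ¬ A < B := by omega
      have hne : ¬ B = A := by omega
      simp [hlt, hA, hne]
    · by_cases heq : A = B
      · have hA : ¬ A < B := by omega
        simp [heq, hA]
      · have hA : A < B := by omega
        simp only [if_neg hlt, if_neg heq, if_pos hA]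
        by_cases h10 : PySem.Int.mod B 10 = 1
        · simp only [if_pos h10]
          have : cnt0 + steps + 1 = cnt0 + (steps + 1) := by omega
          rw [this, ih]
        · simp only [if_neg h10]
          have hmod2 : PySem.Int.mod B 2 = 0 ∨ PySem.Int.mod B 2 = 1 := by
            have := PySem.Int.mod_eq_emod_of_pos (a := B) (b := 2) (by omega)
            omega
          rcases hmod2 with h2 | h2
          · have hne1 : PySem.Int.mod B 2 ≠ 1 := by omega
            simp only [if_pos hne1, if_pos h2, ne_eq]
            have : cnt0 + steps + 1 = cnt0 + (steps + 1) := by omega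
            rw [this, ih]
          · have hne1 : ¬ (PySem.Int.mod B 2 ≠ 1) := by omega
            have h0 : ¬ PySem.Int.mod B 2 = 0 := by omega
            rw [if_neg hne1, if_neg h0]

-- ===== VERDICT (by name: the statement is the Claim_ definition above) =====
theorem solve_spec : Claim_equal_solve := by
  intro A B cnt _ _
  unfold Spec_solve solve solve_alt
  have := solveFuel_eq_loop 200 A B cnt 0
  simpa using this
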